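-- pv_equiv track=rewrite | github.com/motilin/VTK | src/math/tuple_to_matrix.py | replace_tuples_with_matrix
-- ===== SOURCE A (Python) =====
-- def is_valid_tuple_start(input_string, index):
--     """
--     Determine if the parenthesis at the given index starts a valid tuple.
--
--     Checks the context before the opening parenthesis to ensure it's a tuple.
--
--     Args:
--         input_string (str): The full input string
--         index (int): Index of the opening parenthesis
--
--     Returns:
--         bool: Whether the parenthesis begins a valid tuple
--     """
--     # If at the start of string, it could be a tuple
--     if index == 0:
--         return True
--
--     # Check preceding character
--     prev_char = input_string[index - 1]
--
--     # Tuple starts after these characters or at the start of an expression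
--     invalid_preceding_chars = set(
--         "abcdefghijklmnopqrstuvwxyzABCDEFGHIJKLMNOPQRSTUVWXYZ0123456789_)"
--     )
--
--     # Allow tuples that are preceded by function names or other valid characters
--     return prev_char not in invalid_preceding_chars or prev_char.isalpha()
--
-- def replace_tuples_with_matrix(input_string):
--     """
--     Replace tuples in a string with Matrix notation.
--
--     Carefully identifies and replaces tuples while maintaining
--     the integrity of nested expressions.
--
--     Args:
--         input_string (str): The input string containing potential tuples
--
--     Returns:
--         str: The string with tuples replaced by Matrix notation
--     """
--     if not input_string or not isinstance(input_string, str):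
--         return input_string
--
--     result = []
--     i = 0
--     length = len(input_string)
--
--     while i < length:
--         # Potential tuple detection
--         if input_string[i] == "(" and is_valid_tuple_start(input_string, i):
--             # Start of potential tuple detection
--             tuple_start = i
--             parentheses_level = 1
--             comma_count = 0
--             j = i + 1
--
--             # Scan to determine if this is a genuine tuple
--             while j < length and parentheses_level > 0:
--                 if input_string[j] == "(":
--                     parentheses_level += 1
--                 elif input_string[j] == ")":
--                     parentheses_level -= 1
--                 elif input_string[j] == "," and parentheses_level == 1:
--                     comma_count += 1
--
--                 j += 1
--
--             # Confirmed tuple if we have at least one comma and balanced parentheses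
--             if parentheses_level == 0 and comma_count > 0:
--                 tuple_content = input_string[tuple_start + 1 : j - 1]
--                 result.append(f" Matrix([{tuple_content}]) ")
--                 i = j
--             else:
--                 # Not a tuple, append original characters
--                 result.append(input_string[i])
--                 i += 1
--         else:
--             result.append(input_string[i])
--             i += 1
--
--     return "".join(result)
-- ===== SOURCE B (Python) =====
-- def replace_tuples_with_matrix(input_string):
--     """One stack pass precomputes each '('s matching ')' and whether it has a
--     top-level comma; a second pass rewrites tuples as Matrix([...]) without rescanning."""
--     if not input_string or not isinstance(input_string, str):
--         return input_string
--
--     n = len(input_string)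
--     match = {}   # index of '(' -> index of its matching ')'
--     comma = {}   # index of '(' -> has a comma at its top level
--     stack = []
--     for j, ch in enumerate(input_string):
--         if ch == "(":
--             stack.append(j)
--             comma[j] = False
--         elif ch == ")":
--             if stack:
--                 match[stack.pop()] = j
--         elif ch == ",":
--             if stack:
--                 comma[stack[-1]] = True
--
--     out = []
--     i = 0
--     while i < n:
--         ch = input_string[i]
--         if (ch == "(" and _tuple_start_ok(input_string, i)
--                 and i in match and comma[i]):
--             out.append(" Matrix([")
--             out.append(input_string[i + 1 : match[i]])
--             out.append("]) ")
--             i = match[i] + 1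
--         else:
--             out.append(ch)
--             i += 1
--     return "".join(out)
--
--
-- def _tuple_start_ok(s, i):
--     return i == 0 or s[i - 1] not in "0123456789_)"
-- ===== Notes on version B (the rewrite author's own statement) =====
-- stated objective: alternative
-- what changed: A rescans forward from every opening parenthesis to find its matching closer and count top-level commas (nested and failed groups are rescanned repeatedly, quadratic on paren-dense input); B instead makes one stack pass over the string that precomputes every matching-paren position and top-level-comma flag in two dicts, then a single linear rewrite pass uses those lookups.
import Mathlib
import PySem

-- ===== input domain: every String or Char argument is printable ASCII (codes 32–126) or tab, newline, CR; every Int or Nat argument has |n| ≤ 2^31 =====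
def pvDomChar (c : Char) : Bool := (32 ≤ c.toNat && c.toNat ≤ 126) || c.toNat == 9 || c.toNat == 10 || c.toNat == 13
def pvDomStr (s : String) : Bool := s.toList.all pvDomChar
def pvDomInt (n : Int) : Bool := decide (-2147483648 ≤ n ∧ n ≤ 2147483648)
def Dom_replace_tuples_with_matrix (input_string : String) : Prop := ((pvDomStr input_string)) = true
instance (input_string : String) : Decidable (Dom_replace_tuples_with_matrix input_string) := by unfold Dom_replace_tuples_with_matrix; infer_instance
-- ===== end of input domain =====

-- B replaces A's per-'(' rescans by one stack pass that precomputes every matching ')' and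
-- top-level-comma flag in two dicts, then a single rewrite pass (alternative algorithm:
-- no rescanning of nested or failed groups).

-- ===== PORT A =====

-- A's helper is_valid_tuple_start (Char.isAlpha agrees with Python str.isalpha on every
-- character that can make the two sides differ: the set literal below is pure ASCII)
def is_valid_tuple_start (s : List Char) (index : Nat) : Bool :=
  if index = 0 then true
  else
    match s[index - 1]? with
    | none => false   -- unreachable: every call site has 1 ≤ index < s.length
    | some prev_char =>
        !(("abcdefghijklmnopqrstuvwxyzABCDEFGHIJKLMNOPQRSTUVWXYZ0123456789_)".toList).contains prev_char)
        || prev_char.isAlpha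

-- A's inner while loop: scan from j with current nesting level and comma count,
-- returns (final j, final level, comma count). Python's while loop is ported with a fuel
-- counter (the loop advances j by 1 each iteration, so fuel = s.length always suffices).
def pvScanA (s : List Char) : Nat → Nat → Nat → Nat → Nat × Nat × Nat
  | 0, j, level, commas => (j, level, commas)
  | fuel + 1, j, level, commas =>
    if h : j < s.length ∧ 0 < level then
      pvScanA s fuel (j + 1)
        (if s[j]'h.1 = '(' then level + 1 else if s[j]'h.1 = ')' then level - 1 else level)
        (if s[j]'h.1 = ',' ∧ level = 1 then commas + 1 else commas)
    else (j, level, commas)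

-- A's outer while loop, again with a fuel counter: i advances by at least 1 per iteration
-- (a confirmed tuple jumps forward to the scan position), so fuel = s.length suffices.
def pvLoopA (s : List Char) : Nat → Nat → List Char
  | 0, _ => []
  | fuel + 1, i =>
    if h : i < s.length then
      let c := s[i]'h
      if c = '(' ∧ is_valid_tuple_start s i then
        let r := pvScanA s s.length (i + 1) 1 0
        if r.2.1 = 0 ∧ 0 < r.2.2 then
          " Matrix([".toList ++ PySem.List.slice s (some ((i : Int) + 1)) (some ((r.1 : Int) - 1))
            ++ "]) ".toList ++ pvLoopA s fuel r.1
        else c :: pvLoopA s fuel (i + 1)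
      else c :: pvLoopA s fuel (i + 1)
    else []

def replace_tuples_with_matrix (input_string : String) : String :=
  if input_string.toList.isEmpty then input_string
  else String.ofList (pvLoopA input_string.toList input_string.toList.length 0)

-- ===== PORT B =====

def pv_tuple_start_ok (s : List Char) (i : Nat) : Bool :=
  if i = 0 then true
  else
    match s[i - 1]? with
    | none => false   -- unreachable: every call site has 1 ≤ i < s.length
    | some c => !(("0123456789_)".toList).contains c)

-- B's first pass: `for j, ch in enumerate(input_string)` maintaining the stack and the two dicts
def pvPass1 (l : List Char) (j : Nat) (st : List Nat)
    (m : PySem.Dict Nat Nat) (cd : PySem.Dict Nat Bool) :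
    List Nat × PySem.Dict Nat Nat × PySem.Dict Nat Bool :=
  match l with
  | [] => (st, m, cd)
  | ch :: rest =>
    if ch = '(' then pvPass1 rest (j + 1) (j :: st) m (cd.insert j false)
    else if ch = ')' then
      match st with
      | [] => pvPass1 rest (j + 1) st m cd
      | k :: st' => pvPass1 rest (j + 1) st' (m.insert k j) cd
    else if ch = ',' then
      match st with
      | [] => pvPass1 rest (j + 1) st m cd
      | k :: _ => pvPass1 rest (j + 1) st m (cd.insert k true)
    else pvPass1 rest (j + 1) st m cd

-- B's second pass (`while i < n`). Python's while loop is ported with a fuel counter;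
-- fuel = s.length suffices because i advances by at least 1 per iteration (match[i] > i).
-- The `cd.get? i = none` arm is unreachable when `m.get? i` is some (every key of match
-- was pushed, and pushing inserts the comma-dict key); Python would raise KeyError there.
def pvLoopB (s : List Char) (m : PySem.Dict Nat Nat) (cd : PySem.Dict Nat Bool) :
    Nat → Nat → List Char
  | 0, _ => []
  | fuel + 1, i =>
    match s[i]? with
    | none => []
    | some ch =>
      if ch = '(' ∧ pv_tuple_start_ok s i then
        match m.get? i with
        | some j =>
          match cd.get? i with
          | some true =>
              " Matrix([".toList ++ PySem.List.slice s (some ((i : Int) + 1)) (some (j : Int))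
                ++ "]) ".toList ++ pvLoopB s m cd fuel (j + 1)
          | _ => ch :: pvLoopB s m cd fuel (i + 1)
        | none => ch :: pvLoopB s m cd fuel (i + 1)
      else ch :: pvLoopB s m cd fuel (i + 1)

def replace_tuples_with_matrix_alt (input_string : String) : String :=
  if input_string.toList.isEmpty then input_string
  else
    let s := input_string.toList
    let p := pvPass1 s 0 [] PySem.Dict.empty PySem.Dict.empty
    String.ofList (pvLoopB s p.2.1 p.2.2 s.length 0)

-- ===== PRECONDITION & SPEC =====
def Spec_replace_tuples_with_matrix (input_string : String) (out : String) : Prop := out = replace_tuples_with_matrix_alt input_string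
instance (input_string : String) (out : String) : Decidable (Spec_replace_tuples_with_matrix input_string out) := by unfold Spec_replace_tuples_with_matrix; infer_instance

-- ===== CLAIM (what is proved, stated in full; the proofs are below) =====
def Claim_equal_replace_tuples_with_matrix : Prop := ∀ (input_string : String), Dom_replace_tuples_with_matrix input_string → Spec_replace_tuples_with_matrix input_string (replace_tuples_with_matrix input_string)

-- ===== LEMMAS AND PROOFS =====

-- Proof-side characterisation of a balanced group: for the text after a '(',
-- `matchScan t = some (n, k)` means the matching ')' is the n-th character of t and the
-- group contains k commas at its top nesting level; `none` means the '(' is never closed.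
def matchScan : List Char → Option (Nat × Nat)
  | [] => none
  | c :: rest =>
    if c = ')' then some (1, 0)
    else if c = '(' then
      match matchScan rest with
      | none => none
      | some (n1, _) =>
        match matchScan (rest.drop n1) with
        | none => none
        | some (m2, k2) => some (n1 + 1 + m2, k2)
    else
      match matchScan rest with
      | none => none
      | some (n, k) => some (n + 1, if c = ',' then k + 1 else k)
termination_by t => t.length
decreasing_by
  all_goals (simp [List.length_drop]; try omega)

theorem matchScan_bounds : ∀ (t : List Char) (n k : Nat), matchScan t = some (n, k) →
    1 ≤ n ∧ n ≤ t.length := by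
  intro t
  induction t using matchScan.induct with
  | case1 => intro n k h; simp [matchScan] at h
  | case2 rest => intro n k h; simp [matchScan] at h; simp [← h.1]
  | case3 rest hm _ _ => intro n k h; simp [matchScan, hm] at h
  | case4 rest n1 k1 hm1 hm2 _ _ _ => intro n k h; simp [matchScan, hm1, hm2] at h
  | case5 rest n1 k1 hm1 m2 k2 hm2 _ ih1 ih2 =>
    intro n k h
    simp [matchScan, hm1, hm2] at h
    have b1 := ih1 n1 k1 hm1
    have b2 := ih2 m2 k2 hm2
    simp at b2
    simp [← h.1]
    omega
  | case6 c rest h1 h2 hm _ => intro n k h; simp [matchScan, h1, h2, hm] at h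
  | case7 c rest h1 h2 m2 k2 hm ih =>
    intro n k h
    simp [matchScan, h1, h2, hm] at h
    have b := ih m2 k2 hm
    simp [← h.1]
    omega

-- list-suffix form of A's scan, used to bridge index arithmetic
def scanL : List Char → Nat → Nat → Nat × Nat × Nat
  | [], l, cm => (0, l, cm)
  | c :: rest, l, cm =>
    if l = 0 then (0, 0, cm)
    else
      let r := scanL rest (if c = '(' then l + 1 else if c = ')' then l - 1 else l)
        (if c = ',' ∧ l = 1 then cm + 1 else cm)
      (r.1 + 1, r.2)

theorem scanL_zero (t : List Char) (cm : Nat) : scanL t 0 cm = (0, 0, cm) := by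
  cases t <;> simp [scanL]

theorem pvScanA_eq_scanL (s : List Char) :
    ∀ (fuel j l cm : Nat), s.length - j ≤ fuel →
      pvScanA s fuel j l cm = (j + (scanL (s.drop j) l cm).1, (scanL (s.drop j) l cm).2) := by
  intro fuel
  induction fuel with
  | zero =>
    intro j l cm hd
    have hj : s.length ≤ j := by omega
    have hdrop : s.drop j = [] := List.drop_eq_nil_of_le hj
    rw [pvScanA, hdrop, scanL]
    by_cases hl : l = 0
    · subst hl; simp
    · simp
  | succ fuel ih =>
    intro j l cm hd
    rw [pvScanA]; split
    · rename_i h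
      have hdrop : s.drop j = s[j] :: s.drop (j + 1) := List.drop_eq_getElem_cons h.1
      rw [ih (j + 1) _ _ (by omega), hdrop, scanL]
      have hl : ¬ l = 0 := by omega
      simp only [hl, if_false]
      simp only [Prod.mk.injEq]
      exact ⟨by omega, by trivial⟩
    · rename_i h
      by_cases hl : l = 0
      · subst hl; rw [scanL_zero]; simp
      · have hj : s.length ≤ j := by omega
        simp [List.drop_eq_nil_of_le hj, scanL]

theorem scanL_matched : ∀ (t : List Char) (n k : Nat), matchScan t = some (n, k) →
    ∀ l cm, 1 ≤ l →
      scanL t l cm = ((scanL (t.drop n) (l - 1) (cm + if l = 1 then k else 0)).1 + n,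
        (scanL (t.drop n) (l - 1) (cm + if l = 1 then k else 0)).2) := by
  intro t
  induction t using matchScan.induct with
  | case1 => intro n k h; simp [matchScan] at h
  | case2 rest =>
    intro n k h l cm hl
    simp [matchScan] at h
    obtain ⟨hn, hk⟩ := h; subst hn; subst hk
    rw [scanL]
    simp only [show ¬ l = 0 by omega, if_false]
    simp
  | case3 rest hm _ _ => intro n k h; simp [matchScan, hm] at h
  | case4 rest n1 k1 hm1 hm2 _ _ _ => intro n k h; simp [matchScan, hm1, hm2] at h
  | case5 rest n1 k1 hm1 m2 k2 hm2 _ ih1 ih2 =>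
    intro n k h l cm hl
    simp [matchScan, hm1, hm2] at h
    obtain ⟨hn, hk⟩ := h; subst hn; subst hk
    rw [scanL]
    simp only [show ¬ l = 0 by omega, if_false]
    have e1 := ih1 n1 k1 hm1 (l + 1) cm (by omega)
    simp only [show ¬ l + 1 = 1 by omega, if_false, Nat.add_zero, Nat.add_sub_cancel] at e1
    have e2 := ih2 m2 k2 hm2 l cm hl
    simp only [show ('(' = ',') = False by simp, show ('(' = ')') = False by simp,
      false_and, if_false, if_true]
    rw [e1, e2]
    have hdd : ('(' :: rest).drop (n1 + 1 + m2) = List.drop m2 (List.drop n1 rest) := by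
      rw [List.drop_drop, show n1 + 1 + m2 = (m2 + n1) + 1 by omega, List.drop_succ_cons,
        Nat.add_comm]
    rw [hdd]
    simp only [Prod.mk.injEq]
    exact ⟨by omega, by trivial⟩
  | case6 c rest h1 h2 hm _ => intro n k h; simp [matchScan, h1, h2, hm] at h
  | case7 c rest h1 h2 m2 k2 hm ih =>
    intro n k h l cm hl
    simp [matchScan, h1, h2, hm] at h
    obtain ⟨hn, hk⟩ := h; subst hn; subst hk
    rw [scanL]
    simp only [show ¬ l = 0 by omega, if_false]
    simp only [h1, h2, if_false]
    have e := ih m2 k2 hm l (if c = ',' ∧ l = 1 then cm + 1 else cm) hl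
    rw [e]
    have harg : (if c = ',' ∧ l = 1 then cm + 1 else cm) + (if l = 1 then k2 else 0)
        = cm + if l = 1 then (if c = ',' then k2 + 1 else k2) else 0 := by
      split_ifs <;> simp_all <;> omega
    rw [harg]
    simp only [List.drop_succ_cons]
    simp only [Prod.mk.injEq]
    exact ⟨by omega, by trivial⟩

theorem scanL_none : ∀ (t : List Char), matchScan t = none →
    ∀ l cm, 1 ≤ l → (scanL t l cm).2.1 ≠ 0 := by
  intro t
  induction t using matchScan.induct with
  | case1 => intro _ l cm hl; simp [scanL]; omega
  | case2 rest => intro h; simp [matchScan] at h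
  | case3 rest hm _ ih =>
    intro _ l cm hl
    rw [scanL]
    simp only [show ¬ l = 0 by omega, if_false]
    simp only [show ('(' = ',') = False by simp, show ('(' = ')') = False by simp,
      false_and, if_false, if_true]
    exact ih hm (l + 1) cm (by omega)
  | case4 rest n1 k1 hm1 hm2 _ ih1 ih2 =>
    intro _ l cm hl
    rw [scanL]
    simp only [show ¬ l = 0 by omega, if_false]
    simp only [show ('(' = ',') = False by simp, show ('(' = ')') = False by simp,
      false_and, if_false, if_true]
    have e1 := scanL_matched rest n1 k1 hm1 (l + 1) cm (by omega)
    simp only [show ¬ l + 1 = 1 by omega, if_false, Nat.add_zero, Nat.add_sub_cancel] at e1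
    rw [e1]
    exact ih2 hm2 l cm hl
  | case5 rest n1 k1 hm1 m2 k2 hm2 _ _ _ => intro h; simp [matchScan, hm1, hm2] at h
  | case6 c rest h1 h2 hm ih =>
    intro _ l cm hl
    rw [scanL]
    simp only [show ¬ l = 0 by omega, if_false]
    simp only [h1, h2, if_false]
    exact ih hm l _ hl
  | case7 c rest h1 h2 m2 k2 hm _ => intro h; simp [matchScan, h1, h2, hm] at h

-- B-side: splitting the first pass
theorem pvPass1_append (u v : List Char) (j : Nat) (st : List Nat) (m : PySem.Dict Nat Nat)
    (cd : PySem.Dict Nat Bool) :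
    pvPass1 (u ++ v) j st m cd =
      pvPass1 v (j + u.length) (pvPass1 u j st m cd).1 (pvPass1 u j st m cd).2.1
        (pvPass1 u j st m cd).2.2 := by
  induction u generalizing j st m cd with
  | nil => simp [pvPass1]
  | cons ch u ih =>
    have harr : j + (u.length + 1) = j + 1 + u.length := by omega
    simp only [List.cons_append, pvPass1, List.length_cons, harr]
    split_ifs with h1 h2 h3
    · exact ih ..
    · cases st <;> exact ih ..
    · cases st <;> exact ih ..
    · exact ih ..

-- B-side: the first pass over a balanced group pops exactly its opener and records its
-- matching position and comma flag
theorem pvPass1_seg : ∀ (t : List Char) (n k : Nat), matchScan t = some (n, k) →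
    ∀ (b : Nat) (stk : List Nat) (m : PySem.Dict Nat Nat) (cd : PySem.Dict Nat Bool) (k0 : Nat),
      k0 < b → (∀ q ∈ stk, q < b) →
      ∃ m' cd', pvPass1 (t.take n) b (k0 :: stk) m cd = (stk, m', cd')
        ∧ m'.get? k0 = some (b + (n - 1))
        ∧ cd'.get? k0 = (if 0 < k then some true else cd.get? k0)
        ∧ ∀ q, q ≠ k0 → q < b → (m'.get? q = m.get? q ∧ cd'.get? q = cd.get? q) := by
  intro t
  induction t using matchScan.induct with
  | case1 => intro n k h; simp [matchScan] at h
  | case2 rest =>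
    intro n k h b stk m cd k0 hk0 hstk
    simp [matchScan] at h
    obtain ⟨hn, hk⟩ := h; subst hn; subst hk
    refine ⟨m.insert k0 b, cd, ?_, ?_, ?_, ?_⟩
    · simp [pvPass1]
    · simp [PySem.Dict.get?_insert_self]
    · simp
    · intro q hq _; exact ⟨PySem.Dict.get?_insert_of_ne _ _ hq, rfl⟩
  | case3 rest hm _ _ => intro n k h; simp [matchScan, hm] at h
  | case4 rest n1 k1 hm1 hm2 _ _ _ => intro n k h; simp [matchScan, hm1, hm2] at h
  | case5 rest n1 k1 hm1 m2 k2 hm2 _ ih1 ih2 =>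
    intro n k h b stk m cd k0 hk0 hstk
    simp [matchScan, hm1, hm2] at h
    obtain ⟨hn, hk⟩ := h; subst hn; subst hk
    have hb1 := matchScan_bounds rest n1 k1 hm1
    have hb2 := matchScan_bounds (rest.drop n1) m2 k2 hm2
    simp at hb2
    have htk : ('(' :: rest).take (n1 + 1 + m2) = '(' :: (rest.take n1 ++ (rest.drop n1).take m2) := by
      rw [show n1 + 1 + m2 = (n1 + m2) + 1 by omega, List.take_succ_cons, List.take_add]
    obtain ⟨m1, cd1, hS1, hm1k, hcd1k, hpres1⟩ := ih1 n1 k1 hm1 (b + 1) (k0 :: stk) m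
      (cd.insert b false) b (by omega)
      (by intro q hq; simp at hq; rcases hq with rfl | hq; omega; have := hstk q hq; omega)
    obtain ⟨m', cd', hS2, hm2k, hcd2k, hpres2⟩ := ih2 m2 k2 hm2 (b + 1 + n1) stk m1 cd1 k0
      (by omega) (by intro q hq; have := hstk q hq; omega)
    refine ⟨m', cd', ?_, ?_, ?_, ?_⟩
    · rw [htk]
      rw [pvPass1.eq_def]
      dsimp only
      simp only [if_true]
      rw [pvPass1_append, hS1]
      have hlt : (rest.take n1).length = n1 := by simp [List.length_take]; omega
      rw [hlt] at *
      exact hS2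
    · rw [hm2k]; congr 1; omega
    · rw [hcd2k, hpres1 k0 (by omega) (by omega) |>.2,
        PySem.Dict.get?_insert_of_ne _ _ (show k0 ≠ b by omega)]
    · intro q hq hqb
      have p2 := hpres2 q hq (by omega)
      have p1 := hpres1 q (by omega) (by omega)
      refine ⟨?_, ?_⟩
      · rw [p2.1, p1.1]
      · rw [p2.2, p1.2, PySem.Dict.get?_insert_of_ne _ _ (show q ≠ b by omega)]
  | case6 c rest h1 h2 hm _ => intro n k h; simp [matchScan, h1, h2, hm] at h
  | case7 c rest h1 h2 m2 k2 hm ih =>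
    intro n k h b stk m cd k0 hk0 hstk
    simp [matchScan, h1, h2, hm] at h
    obtain ⟨hn, hk⟩ := h; subst hn; subst hk
    have hb2 := matchScan_bounds rest m2 k2 hm
    have hcd1 : ∀ cd₁ : PySem.Dict Nat Bool,
        pvPass1 ((c :: rest).take (m2 + 1)) b (k0 :: stk) m cd₁
          = pvPass1 (rest.take m2) (b + 1) (k0 :: stk) m
              (if c = ',' then cd₁.insert k0 true else cd₁) := by
      intro cd₁
      rw [List.take_succ_cons, pvPass1.eq_def]
      dsimp only
      simp only [h1, h2, if_false]
      split_ifs with hc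
      · rfl
      · rfl
    by_cases hc : c = ','
    · obtain ⟨m', cd', hS, hmk, hcdk, hpres⟩ := ih m2 k2 hm (b + 1) stk m
        (cd.insert k0 true) k0 (by omega) (by intro q hq; have := hstk q hq; omega)
      refine ⟨m', cd', ?_, ?_, ?_, ?_⟩
      · rw [hcd1 cd, if_pos hc]; exact hS
      · rw [hmk]; congr 1; omega
      · rw [hcdk, show (if c = ',' then k2 + 1 else k2) = k2 + 1 from if_pos hc,
          if_pos (Nat.succ_pos k2)]
        split_ifs with h0
        · rfl
        · exact PySem.Dict.get?_insert_self cd k0 true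
      · intro q hq hqb
        have p := hpres q hq (by omega)
        exact ⟨p.1, by rw [p.2, PySem.Dict.get?_insert_of_ne _ _ hq]⟩
    · obtain ⟨m', cd', hS, hmk, hcdk, hpres⟩ := ih m2 k2 hm (b + 1) stk m cd k0 (by omega)
        (by intro q hq; have := hstk q hq; omega)
      refine ⟨m', cd', ?_, ?_, ?_, ?_⟩
      · rw [hcd1 cd, if_neg hc]; exact hS
      · rw [hmk]; congr 1; omega
      · rw [hcdk, show (if c = ',' then k2 + 1 else k2) = k2 from if_neg hc]
      · intro q hq hqb; exact hpres q hq (by omega)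

-- B-side: over text where the top opener never closes, no stack entry gets a match entry
theorem pvPass1_npop : ∀ (t : List Char), matchScan t = none →
    ∀ (b : Nat) (stk : List Nat) (m : PySem.Dict Nat Nat) (cd : PySem.Dict Nat Bool),
      (∀ q ∈ stk, q < b) →
      ∀ q ∈ stk, (pvPass1 t b stk m cd).2.1.get? q = m.get? q := by
  intro t
  induction t using matchScan.induct with
  | case1 => intro _ b stk m cd _ q hq; simp [pvPass1]
  | case2 rest => intro h; simp [matchScan] at h
  | case3 rest hm _ ih =>
    intro _ b stk m cd hstk q hq
    rw [pvPass1.eq_def]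
    dsimp only
    simp only [if_true]
    exact ih hm (b + 1) (b :: stk) m (cd.insert b false)
      (by intro p hp; simp at hp; rcases hp with rfl | hp; omega; have := hstk p hp; omega)
      q (List.mem_cons_of_mem _ hq)
  | case4 rest n1 k1 hm1 hm2 _ _ ih2 =>
    intro _ b stk m cd hstk q hq
    have htk : rest = rest.take n1 ++ rest.drop n1 := (List.take_append_drop n1 rest).symm
    rw [pvPass1.eq_def]
    dsimp only
    simp only [if_true]
    conv_lhs => rw [htk]
    rw [pvPass1_append]
    obtain ⟨m1, cd1, hS1, hm1k, hcd1k, hpres1⟩ := pvPass1_seg rest n1 k1 hm1 (b + 1) stk m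
      (cd.insert b false) b (by omega) (by intro p hp; have := hstk p hp; omega)
    have hlt : (rest.take n1).length = n1 := by
      have := (matchScan_bounds rest n1 k1 hm1).2; simp [List.length_take]; omega
    rw [hlt, hS1]
    dsimp only
    have hstep := ih2 hm2 (b + 1 + n1) stk m1 cd1
      (by intro p hp; have := hstk p hp; omega) q hq
    rw [hstep]
    exact (hpres1 q (by have := hstk q hq; omega) (by have := hstk q hq; omega)).1
  | case5 rest n1 k1 hm1 m2 k2 hm2 _ _ _ => intro h; simp [matchScan, hm1, hm2] at h
  | case6 c rest h1 h2 hm ih =>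
    intro _ b stk m cd hstk q hq
    rw [pvPass1.eq_def]
    dsimp only
    simp only [h1, h2, if_false]
    by_cases hc : c = ','
    · simp only [hc, if_true]
      cases stk with
      | nil => simp at hq
      | cons k st' =>
        have := ih hm (b + 1) (k :: st') m (cd.insert k true)
          (by intro p hp; have := hstk p hp; omega) q hq
        exact this
    · simp only [hc, if_false]
      exact ih hm (b + 1) stk m cd (by intro p hp; have := hstk p hp; omega) q hq
  | case7 c rest h1 h2 m2 k2 hm _ => intro h; simp [matchScan, h1, h2, hm] at h

-- B-side: keys below the base that are not on the stack are never touched again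
theorem pvPass1_pres : ∀ (t : List Char) (b : Nat) (stk : List Nat) (m : PySem.Dict Nat Nat)
    (cd : PySem.Dict Nat Bool) (q : Nat), q < b → q ∉ stk →
      (pvPass1 t b stk m cd).2.1.get? q = m.get? q
      ∧ (pvPass1 t b stk m cd).2.2.get? q = cd.get? q
      ∧ q ∉ (pvPass1 t b stk m cd).1 := by
  intro t
  induction t with
  | nil => intro b stk m cd q hqb hqs; simp [pvPass1]; exact hqs
  | cons ch rest ih =>
    intro b stk m cd q hqb hqs
    rw [pvPass1.eq_def]
    dsimp only
    split_ifs with h1 h2 h3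
    · have := ih (b + 1) (b :: stk) m (cd.insert b false) q (by omega)
        (by simp; exact ⟨by omega, hqs⟩)
      refine ⟨this.1, ?_, this.2.2⟩
      rw [this.2.1, PySem.Dict.get?_insert_of_ne _ _ (by omega)]
    · cases stk with
      | nil => exact ih (b + 1) [] m cd q (by omega) (by simp)
      | cons k st' =>
        have hqk : q ≠ k := by intro h; exact hqs (h ▸ List.mem_cons_self ..)
        have hqs' : q ∉ st' := fun h => hqs (List.mem_cons_of_mem _ h)
        have := ih (b + 1) st' (m.insert k b) cd q (by omega) hqs'
        refine ⟨?_, this.2.1, this.2.2⟩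
        rw [this.1, PySem.Dict.get?_insert_of_ne _ _ hqk]
    · cases stk with
      | nil => exact ih (b + 1) [] m cd q (by omega) (by simp)
      | cons k st' =>
        have hqk : q ≠ k := by intro h; exact hqs (h ▸ List.mem_cons_self ..)
        have := ih (b + 1) (k :: st') m (cd.insert k true) q (by omega) hqs
        refine ⟨this.1, ?_, this.2.2⟩
        rw [this.2.1, PySem.Dict.get?_insert_of_ne _ _ hqk]
    · exact ih (b + 1) stk m cd q (by omega) hqs

-- B-side: the first pass only creates stack entries and dict keys below base + length
theorem pvPass1_keys : ∀ (t : List Char) (b : Nat) (stk : List Nat) (m : PySem.Dict Nat Nat)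
    (cd : PySem.Dict Nat Bool),
      (∀ q ∈ stk, q < b) → (∀ q, b ≤ q → m.get? q = none ∧ cd.get? q = none) →
      (∀ q ∈ (pvPass1 t b stk m cd).1, q < b + t.length)
      ∧ (∀ q, b + t.length ≤ q → (pvPass1 t b stk m cd).2.1.get? q = none
          ∧ (pvPass1 t b stk m cd).2.2.get? q = none) := by
  intro t
  induction t with
  | nil => intro b stk m cd hs hd; simp [pvPass1]; exact ⟨hs, fun q hq => hd q (by omega)⟩
  | cons ch rest ih =>
    intro b stk m cd hs hd
    have hlen : b + (ch :: rest).length = (b + 1) + rest.length := by simp; omega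
    rw [pvPass1.eq_def, hlen]
    dsimp only
    split_ifs with h1 h2 h3
    · refine ih (b + 1) (b :: stk) m (cd.insert b false) ?_ ?_
      · intro q hq; simp at hq; rcases hq with rfl | hq
        · omega
        · have := hs q hq; omega
      · intro q hq
        refine ⟨(hd q (by omega)).1, ?_⟩
        rw [PySem.Dict.get?_insert_of_ne _ _ (by omega)]
        exact (hd q (by omega)).2
    · cases stk with
      | nil => exact ih (b + 1) [] m cd (by simp) (fun q hq => hd q (by omega))
      | cons k st' =>
        refine ih (b + 1) st' (m.insert k b) cd ?_ ?_
        · intro q hq; have := hs q (List.mem_cons_of_mem _ hq); omega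
        · intro q hq
          have hk := hs k (List.mem_cons_self ..)
          refine ⟨?_, (hd q (by omega)).2⟩
          rw [PySem.Dict.get?_insert_of_ne _ _ (by omega)]
          exact (hd q (by omega)).1
    · cases stk with
      | nil => exact ih (b + 1) [] m cd (by simp) (fun q hq => hd q (by omega))
      | cons k st' =>
        refine ih (b + 1) (k :: st') m (cd.insert k true) ?_ ?_
        · intro q hq; have := hs q hq; omega
        · intro q hq
          have hk := hs k (List.mem_cons_self ..)
          refine ⟨(hd q (by omega)).1, ?_⟩
          rw [PySem.Dict.get?_insert_of_ne _ _ (by omega)]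
          exact (hd q (by omega)).2
    · exact ih (b + 1) stk m cd (fun q hq => by have := hs q hq; omega)
        (fun q hq => hd q (by omega))

-- the dictionaries of the full first pass, at a '(' position, agree with matchScan
theorem pvPass1_matched {s : List Char} {i n k : Nat}
    (hi : s[i]? = some '(') (hm : matchScan (s.drop (i + 1)) = some (n, k)) :
    (pvPass1 s 0 [] PySem.Dict.empty PySem.Dict.empty).2.1.get? i = some (i + n)
    ∧ (pvPass1 s 0 [] PySem.Dict.empty PySem.Dict.empty).2.2.get? i = some (decide (0 < k)) := by
  obtain ⟨hil, hci⟩ := List.getElem?_eq_some_iff.mp hi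
  have hlt : (s.take i).length = i := by simp [List.length_take]; omega
  have happ := pvPass1_append (s.take i) (s.drop i) 0 [] PySem.Dict.empty PySem.Dict.empty
  rw [List.take_append_drop, hlt, Nat.zero_add] at happ
  have hkeys := pvPass1_keys (s.take i) 0 [] PySem.Dict.empty PySem.Dict.empty (by simp)
    (by intro q _; exact ⟨PySem.Dict.get?_empty q, PySem.Dict.get?_empty q⟩)
  rw [hlt, Nat.zero_add] at hkeys
  obtain ⟨hstk0, hdict0⟩ := hkeys
  have hdropi : s.drop i = '(' :: s.drop (i + 1) := by rw [List.drop_eq_getElem_cons hil, hci]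
  rw [happ, hdropi, pvPass1.eq_def]
  dsimp only
  simp only [if_true]
  have hbnd := matchScan_bounds _ n k hm
  have hlu : ((s.drop (i + 1)).take n).length = n := by
    simp only [List.length_take, List.length_drop] at *; omega
  obtain ⟨m', cd', hS, hmk, hcdk, hpres⟩ := pvPass1_seg (s.drop (i + 1)) n k hm (i + 1)
    (pvPass1 (s.take i) 0 [] PySem.Dict.empty PySem.Dict.empty).1
    (pvPass1 (s.take i) 0 [] PySem.Dict.empty PySem.Dict.empty).2.1
    ((pvPass1 (s.take i) 0 [] PySem.Dict.empty PySem.Dict.empty).2.2.insert i false) i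
    (by omega) (by intro q hq; have := hstk0 q hq; omega)
  have happ2 := pvPass1_append ((s.drop (i + 1)).take n) ((s.drop (i + 1)).drop n) (i + 1)
    (i :: (pvPass1 (s.take i) 0 [] PySem.Dict.empty PySem.Dict.empty).1)
    (pvPass1 (s.take i) 0 [] PySem.Dict.empty PySem.Dict.empty).2.1
    ((pvPass1 (s.take i) 0 [] PySem.Dict.empty PySem.Dict.empty).2.2.insert i false)
  rw [List.take_append_drop, hS, hlu] at happ2
  rw [happ2]
  dsimp only
  have hfin := pvPass1_pres ((s.drop (i + 1)).drop n) (i + 1 + n)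
    (pvPass1 (s.take i) 0 [] PySem.Dict.empty PySem.Dict.empty).1 m' cd' i (by omega)
    (fun hq => by have := hstk0 i hq; omega)
  refine ⟨?_, ?_⟩
  · rw [hfin.1, hmk]; congr 1; omega
  · rw [hfin.2.1, hcdk]
    by_cases hk : 0 < k
    · simp [hk]
    · simp only [hk, if_false]
      rw [PySem.Dict.get?_insert_self]
      simp

theorem pvPass1_unmatched {s : List Char} {i : Nat}
    (hi : s[i]? = some '(') (hm : matchScan (s.drop (i + 1)) = none) :
    (pvPass1 s 0 [] PySem.Dict.empty PySem.Dict.empty).2.1.get? i = none := by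
  obtain ⟨hil, hci⟩ := List.getElem?_eq_some_iff.mp hi
  have hlt : (s.take i).length = i := by simp [List.length_take]; omega
  have happ := pvPass1_append (s.take i) (s.drop i) 0 [] PySem.Dict.empty PySem.Dict.empty
  rw [List.take_append_drop, hlt, Nat.zero_add] at happ
  have hkeys := pvPass1_keys (s.take i) 0 [] PySem.Dict.empty PySem.Dict.empty (by simp)
    (by intro q _; exact ⟨PySem.Dict.get?_empty q, PySem.Dict.get?_empty q⟩)
  rw [hlt, Nat.zero_add] at hkeys
  obtain ⟨hstk0, hdict0⟩ := hkeys
  have hdropi : s.drop i = '(' :: s.drop (i + 1) := by rw [List.drop_eq_getElem_cons hil, hci]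
  rw [happ, hdropi, pvPass1.eq_def]
  dsimp only
  simp only [if_true]
  have hn := pvPass1_npop (s.drop (i + 1)) hm (i + 1)
    (i :: (pvPass1 (s.take i) 0 [] PySem.Dict.empty PySem.Dict.empty).1)
    (pvPass1 (s.take i) 0 [] PySem.Dict.empty PySem.Dict.empty).2.1
    ((pvPass1 (s.take i) 0 [] PySem.Dict.empty PySem.Dict.empty).2.2.insert i false)
    (by intro q hq; simp at hq; rcases hq with rfl | hq; omega; have := hstk0 q hq; omega)
    i (List.mem_cons_self ..)
  rw [hn]
  exact (hdict0 i (le_refl i)).1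

-- the two validity tests agree character by character
theorem valid_eq (s : List Char) (i : Nat) :
    is_valid_tuple_start s i = pv_tuple_start_ok s i := by
  unfold is_valid_tuple_start pv_tuple_start_ok
  split_ifs with h0
  · rfl
  · cases hp : s[i - 1]? with
    | none => rfl
    | some c =>
      dsimp only
      by_cases hsmall : ("0123456789_)".toList).contains c = true
      · have hmem : c ∈ ['0','1','2','3','4','5','6','7','8','9','_',')'] := by
          simpa using List.contains_iff_mem.mp hsmall
        fin_cases hmem <;> decide
      · have hR : ("0123456789_)".toList).contains c = false := by
          simpa using hsmall
        rw [hR]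
        by_cases hbig :
            ("abcdefghijklmnopqrstuvwxyzABCDEFGHIJKLMNOPQRSTUVWXYZ0123456789_)".toList).contains c
              = true
        · have hmem : c ∈ "abcdefghijklmnopqrstuvwxyzABCDEFGHIJKLMNOPQRSTUVWXYZ0123456789_)".toList :=
            List.contains_iff_mem.mp hbig
          have hsm : c ∉ ['0','1','2','3','4','5','6','7','8','9','_',')'] := by
            intro h
            exact hsmall (List.contains_iff_mem.mpr
              (show c ∈ "0123456789_)".toList by simpa using h))
          simp only [show "abcdefghijklmnopqrstuvwxyzABCDEFGHIJKLMNOPQRSTUVWXYZ0123456789_)".toList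
            = ['a','b','c','d','e','f','g','h','i','j','k','l','m','n','o','p','q','r','s','t','u',
               'v','w','x','y','z','A','B','C','D','E','F','G','H','I','J','K','L','M','N','O','P',
               'Q','R','S','T','U','V','W','X','Y','Z','0','1','2','3','4','5','6','7','8','9','_',
               ')'] from rfl] at hmem
          fin_cases hmem <;> first | decide | (exact absurd (by decide) hsm)
        · have hB :
              ("abcdefghijklmnopqrstuvwxyzABCDEFGHIJKLMNOPQRSTUVWXYZ0123456789_)".toList).contains c
                = false := by simpa using hbig
          rw [hB]
          rfl

-- the two main loops agree
theorem mainLoop_eq (s : List Char) (m : PySem.Dict Nat Nat) (cd : PySem.Dict Nat Bool)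
    (hp : (pvPass1 s 0 [] PySem.Dict.empty PySem.Dict.empty).2 = (m, cd)) :
    ∀ fuel i, s.length - i ≤ fuel → pvLoopA s fuel i = pvLoopB s m cd fuel i := by
  have hpm : (pvPass1 s 0 [] PySem.Dict.empty PySem.Dict.empty).2.1 = m := by rw [hp]
  have hpc : (pvPass1 s 0 [] PySem.Dict.empty PySem.Dict.empty).2.2 = cd := by rw [hp]
  intro fuel
  induction fuel with
  | zero =>
    intro i hfi
    rfl
  | succ fuel ih =>
    intro i hfi
    by_cases hil : i < s.length
    · have hgi : s[i]? = some s[i] := List.getElem?_eq_getElem hil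
      rw [pvLoopA.eq_def, pvLoopB.eq_def]
      dsimp only
      rw [dif_pos hil, hgi]
      dsimp only
      by_cases hcond : s[i] = '(' ∧ is_valid_tuple_start s i
      · have hcondB : s[i] = '(' ∧ pv_tuple_start_ok s i = true := by
          rw [← valid_eq]; exact hcond
        rw [if_pos hcond, if_pos hcondB]
        have hE := pvScanA_eq_scanL s s.length (i + 1) 1 0 (by omega)
        cases hms : matchScan (s.drop (i + 1)) with
        | none =>
          have hA := scanL_none (s.drop (i + 1)) hms 1 0 (le_refl 1)
          have hnz : ¬ ((pvScanA s s.length (i + 1) 1 0).2.1 = 0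
              ∧ 0 < (pvScanA s s.length (i + 1) 1 0).2.2) := by
            rw [hE]; intro hcc; exact hA hcc.1
          rw [if_neg hnz]
          have hq := pvPass1_unmatched (s := s) (i := i) (by rw [hgi, hcond.1]) hms
          rw [hpm] at hq
          rw [hq]
          exact congrArg _ (ih (i + 1) (by omega))
        | some nk =>
          obtain ⟨n, k⟩ := nk
          have hbnd := matchScan_bounds _ n k hms
          have hsc := scanL_matched (s.drop (i + 1)) n k hms 1 0 (le_refl 1)
          rw [if_pos rfl] at hsc
          rw [Nat.zero_add, Nat.sub_self, scanL_zero] at hsc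
          have hr : pvScanA s s.length (i + 1) 1 0 = (i + 1 + n, 0, k) := by
            rw [hE, hsc]
            simp
          rw [hr]
          have hq := pvPass1_matched (s := s) (i := i) (n := n) (k := k)
            (by rw [hgi, hcond.1]) hms
          rw [hpm, hpc] at hq
          by_cases hk : 0 < k
          · rw [if_pos ⟨rfl, hk⟩]
            rw [hq.1]
            have hcdt : cd.get? i = some true := by rw [hq.2]; simp [hk]
            rw [hcdt]
            dsimp only
            rw [show ((i + 1 + n : Nat) : Int) = ((i + n : Nat) : Int) + 1 by push_cast; ring]
            rw [show ((i + n : Nat) : Int) + 1 - 1 = ((i + n : Nat) : Int) by ring]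
            rw [show i + 1 + n = (i + n) + 1 by omega]
            rw [ih ((i + n) + 1) (by omega)]
          · have hk0 : k = 0 := by omega
            rw [if_neg (by intro hcc; exact hk hcc.2)]
            rw [hq.1]
            have hcdf : cd.get? i = some false := by rw [hq.2]; simp [hk0]
            rw [hcdf]
            dsimp only
            exact congrArg _ (ih (i + 1) (by omega))
      · have hcondB : ¬ (s[i] = '(' ∧ pv_tuple_start_ok s i = true) := by
          rw [← valid_eq]; exact hcond
        rw [if_neg hcond, if_neg hcondB]
        exact congrArg _ (ih (i + 1) (by omega))
    · rw [pvLoopA.eq_def, pvLoopB.eq_def]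
      dsimp only
      rw [dif_neg hil, List.getElem?_eq_none (by omega)]

-- ===== VERDICT (by name: the statement is the Claim_ definition above) =====
theorem replace_tuples_with_matrix_spec : Claim_equal_replace_tuples_with_matrix := by
  intro input_string _
  unfold Spec_replace_tuples_with_matrix replace_tuples_with_matrix replace_tuples_with_matrix_alt
  by_cases h : input_string.toList.isEmpty
  · simp [h]
  · simp only [h]
    have := mainLoop_eq input_string.toList
      (pvPass1 input_string.toList 0 [] PySem.Dict.empty PySem.Dict.empty).2.1
      (pvPass1 input_string.toList 0 [] PySem.Dict.empty PySem.Dict.empty).2.2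
      rfl input_string.toList.length 0 (by omega)
    rw [this]
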